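-- pv_equiv track=rewrite | github.com/Abhinavvv0208/Competitive-coding | Numbers part 1/Friendly Pair Numbers.py | friendly_pair
-- ===== SOURCE A (Python) =====
-- def friendly_pair(n1,n2):
--     sum1=sum2=0
--     for i in range(1,n1):
--         if(n1%i==0):
--             sum1+=i
--     for j in range(1,n2):
--         if(n2%j==0):
--             sum2+=j
--     if (sum1==n1 and sum2==n2):
--         return True
--     else:
--         return False
-- ===== SOURCE B (Python) =====
-- def _proper_sum(n):
--     # sum of proper divisors of n (0 for n < 1), found by scanning only up to sqrt(n)
--     if n < 1:
--         return 0
--     s = 0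
--     i = 1
--     while i * i <= n:
--         if n % i == 0:
--             s += i
--             q = n // i
--             if q != i:
--                 s += q
--         i += 1
--     return s - n
--
--
-- def friendly_pair(n1, n2):
--     return _proper_sum(n1) == n1 and _proper_sum(n2) == n2
-- ===== Notes on version B (the rewrite author's own statement) =====
-- stated objective: faster
-- what changed: Replaces the two O(n) scans over all i < n by a single divisor-pairing loop up to sqrt(n) that adds each divisor d together with its cofactor n//d.
import Mathlib
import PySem

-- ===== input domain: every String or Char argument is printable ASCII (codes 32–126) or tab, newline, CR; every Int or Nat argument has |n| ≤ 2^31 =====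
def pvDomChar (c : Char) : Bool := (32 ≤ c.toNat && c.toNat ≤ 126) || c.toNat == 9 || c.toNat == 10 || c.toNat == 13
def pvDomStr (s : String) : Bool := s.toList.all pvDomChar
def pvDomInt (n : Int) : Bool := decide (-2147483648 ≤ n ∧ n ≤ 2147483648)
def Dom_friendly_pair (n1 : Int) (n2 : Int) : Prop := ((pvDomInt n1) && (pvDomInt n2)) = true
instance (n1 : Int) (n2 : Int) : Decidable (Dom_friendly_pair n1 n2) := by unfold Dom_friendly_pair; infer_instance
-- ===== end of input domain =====

-- B replaces A's two O(n) divisor scans by divisor-pairing loops that stop at sqrt(n) (objective: faster).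

-- ===== PORT A =====
-- literal port of A: two 'for i in range(1, n)' accumulation loops, then the final if
def friendly_pair (n1 : Int) (n2 : Int) : Bool :=
  let sum1 := (PySem.List.pyRange 1 n1 1).foldl (fun s i => if PySem.Int.mod n1 i == 0 then s + i else s) 0
  let sum2 := (PySem.List.pyRange 1 n2 1).foldl (fun s j => if PySem.Int.mod n2 j == 0 then s + j else s) 0
  if sum1 = n1 ∧ sum2 = n2 then true else false

-- ===== PORT B =====
-- the 'while i * i <= n' loop of Source B's _proper_sum (state s, i as in the Python; q := n // i inlined)
def properSumLoopB (n : Int) (i : Int) (s : Int) : Int :=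
  if _h : i * i ≤ n then
    properSumLoopB n (i + 1)
      (if PySem.Int.mod n i == 0 then
        (if PySem.Int.floordiv n i ≠ i then s + i + PySem.Int.floordiv n i else s + i)
      else s)
  else s
termination_by (n + 1 - i).toNat
decreasing_by
  have hin : i ≤ n := by nlinarith [mul_self_nonneg i, mul_self_nonneg (i - 1)]
  omega

-- Source B's _proper_sum
def properSumB (n : Int) : Int :=
  if n < 1 then 0 else properSumLoopB n 1 0 - n

def friendly_pair_alt (n1 : Int) (n2 : Int) : Bool :=
  (properSumB n1 == n1) && (properSumB n2 == n2)

-- ===== PRECONDITION & SPEC =====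
def Spec_friendly_pair (n1 : Int) (n2 : Int) (out : Bool) : Prop := out = friendly_pair_alt n1 n2
instance (n1 : Int) (n2 : Int) (out : Bool) : Decidable (Spec_friendly_pair n1 n2 out) := by unfold Spec_friendly_pair; infer_instance

-- ===== CLAIM (what is proved, stated in full; the proofs are below) =====
def Claim_equal_friendly_pair : Prop := ∀ (n1 : Int) (n2 : Int), Dom_friendly_pair n1 n2 → Spec_friendly_pair n1 n2 (friendly_pair n1 n2)

-- ===== LEMMAS AND PROOFS =====

-- A's accumulation loop as a named function (proof-side only)
def aFold (n : Int) : Int :=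
  (PySem.List.pyRange 1 n 1).foldl (fun s i => if PySem.Int.mod n i == 0 then s + i else s) 0

-- the contribution of candidate divisor d in B's sqrt-loop over m
def pairTerm (m d : Nat) : Int :=
  if d ∣ m ∧ d * d ≤ m then ((d : Int) + if d * d < m then ((m / d : Nat) : Int) else 0) else 0

-- sum of proper divisors of m, the common specification value
def properSumSpec (m : Nat) : Int := ∑ d ∈ Finset.Ico 1 m, if d ∣ m then (d : Int) else 0

lemma foldl_divsum (n : Int) (l : List Int) (s : Int) :
    l.foldl (fun s i => if PySem.Int.mod n i == 0 then s + i else s) s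
      = s + (l.map (fun i => if PySem.Int.mod n i == 0 then i else 0)).sum := by
  induction l generalizing s with
  | nil => simp
  | cons x xs ih =>
    simp only [List.foldl_cons, List.map_cons, List.sum_cons]
    rw [ih]
    by_cases h : (PySem.Int.mod n x == 0) = true
    · rw [if_pos h, if_pos h]; ring
    · rw [if_neg h, if_neg h]; ring

-- A's loop computes the sum of proper divisors
lemma aFold_eq (m : Nat) (hm : 1 ≤ m) : aFold (m : Int) = properSumSpec m := by
  unfold aFold properSumSpec
  rw [foldl_divsum, PySem.List.pyRange_one, List.map_map, zero_add]
  have ht : ((m : Int) - 1).toNat = m - 1 := by omega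
  rw [ht]
  have hlist : (List.map ((fun i => if (PySem.Int.mod (m:Int) i == 0) = true then i else 0) ∘ fun k : Nat => 1 + (k:Int)) (List.range (m - 1))).sum
      = ∑ j ∈ Finset.range (m-1), (if (PySem.Int.mod (m:Int) (1 + (j:Int)) == 0) = true then 1 + (j:Int) else 0) := rfl
  rw [hlist, Finset.sum_Ico_eq_sum_range]
  apply Finset.sum_congr rfl
  intro j _
  have hc : (PySem.Int.mod (m:Int) (1 + (j:Int)) == 0) = true ↔ (1 + j) ∣ m := by
    rw [beq_iff_eq, PySem.Int.mod_eq_zero_iff_dvd]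
    constructor
    · intro h; exact_mod_cast h
    · intro h; exact_mod_cast h
  by_cases h : (1 + j) ∣ m
  · rw [if_pos (hc.mpr h), if_pos h]; push_cast; ring
  · rw [if_neg (fun hh => h (hc.mp hh)), if_neg h]

-- invariant of B's sqrt-loop: what is still to be added from position i on
lemma loop_inv (m : Nat) (k : Nat) : ∀ (i s : Int), 1 ≤ i → k = m + 1 - i.toNat →
    properSumLoopB (m : Int) i s = s + ∑ d ∈ Finset.Ico i.toNat (m + 1), pairTerm m d := by
  induction k with
  | zero =>
    intro i s hi hk
    have hgt : (m : Int) < i := by omega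
    rw [properSumLoopB, dif_neg (by nlinarith : ¬ (i * i ≤ (m:Int)))]
    rw [Finset.Ico_eq_empty (by omega), Finset.sum_empty, add_zero]
  | succ j ih =>
    intro i s hi hk
    by_cases h : i * i ≤ (m : Int)
    · have him : i ≤ (m : Int) := by nlinarith [mul_self_nonneg (i - 1)]
      set d : Nat := i.toNat with hd
      have hdi : (d : Int) = i := by omega
      have hdm : d ≤ m := by omega
      rw [properSumLoopB, dif_pos h]
      have hstep : (i + 1).toNat = d + 1 := by omega
      rw [ih (i + 1) _ (by omega) (by omega), hstep]
      rw [Finset.sum_eq_sum_Ico_succ_bot (by omega : d < m + 1)]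
      have hddm : d * d ≤ m := by
        have : (d : Int) * d ≤ (m : Int) := by rw [hdi]; exact h
        exact_mod_cast this
      have hmodiff : (PySem.Int.mod (m:Int) i == 0) = true ↔ d ∣ m := by
        rw [beq_iff_eq, PySem.Int.mod_eq_zero_iff_dvd, ← hdi]
        exact Int.natCast_dvd_natCast
      by_cases hdvd : d ∣ m
      · have hq : PySem.Int.floordiv (m:Int) i = ((m / d : Nat) : Int) := by
          rw [← hdi]; exact PySem.Int.floordiv_natCast m d
        rw [if_pos (hmodiff.mpr hdvd)]
        have hpt : pairTerm m d = (d : Int) + if d * d < m then ((m / d : Nat) : Int) else 0 := by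
          rw [pairTerm, if_pos ⟨hdvd, hddm⟩]
        by_cases hne : m / d = d
        · have hsq : d * d = m := by
            have h2 := Nat.div_mul_cancel hdvd
            rw [hne] at h2; exact h2
          rw [if_neg (by rw [hq, hne, hdi]; simp)]
          rw [hpt, if_neg (by omega), ← hdi]
          ring
        · have hlt : d * d < m := by
            rcases lt_or_eq_of_le hddm with h1 | h1
            · exact h1
            · exfalso; apply hne; rw [← h1, Nat.mul_div_cancel_left d (by omega : 0 < d)]
          rw [if_pos (by rw [hq, ← hdi]; exact fun hc => hne (by exact_mod_cast hc))]
          rw [hpt, if_pos hlt, hq, ← hdi]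
          ring
      · rw [if_neg (fun hh => hdvd (hmodiff.mp hh))]
        rw [pairTerm, if_neg (fun hc => hdvd hc.1)]
        ring
    · rw [properSumLoopB, dif_neg h]
      rw [Finset.sum_eq_zero, add_zero]
      intro d hd
      rw [Finset.mem_Ico] at hd
      rw [pairTerm, if_neg]
      rintro ⟨-, hdd⟩
      apply h
      have h1 : i ≤ (d : Int) := by omega
      have h2 : (0:Int) ≤ i := by omega
      calc i * i ≤ (d:Int) * d := by nlinarith
        _ ≤ (m : Int) := by exact_mod_cast hdd

-- the sqrt-loop total is the full divisor sum: pair each small divisor d with its cofactor m / d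
lemma pairing (m : Nat) (hm : 1 ≤ m) :
    ∑ d ∈ Finset.Ico 1 (m + 1), pairTerm m d = properSumSpec m + (m : Int) := by
  have hm0 : m ≠ 0 := by omega
  have hrhs : properSumSpec m + (m : Int) = ∑ d ∈ m.divisors, (d : Int) := by
    rw [properSumSpec,
      show (m.divisors : Finset Nat) = Finset.filter (· ∣ m) (Finset.Ico 1 (m+1)) from rfl,
      Finset.sum_filter, Finset.sum_Ico_succ_top (by omega : (1:ℕ) ≤ m), if_pos (dvd_refl m)]
  rw [hrhs]
  have hlhs : ∑ d ∈ Finset.Ico 1 (m + 1), pairTerm m d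
      = ∑ d ∈ m.divisors, (if d * d ≤ m then ((d : Int) + if d * d < m then ((m / d : Nat) : Int) else 0) else 0) := by
    rw [show (m.divisors : Finset Nat) = Finset.filter (· ∣ m) (Finset.Ico 1 (m+1)) from rfl,
      Finset.sum_filter]
    apply Finset.sum_congr rfl
    intro d _
    rw [pairTerm]
    by_cases h1 : d ∣ m <;> by_cases h2 : d * d ≤ m <;> simp [h1, h2]
  rw [hlhs,
    ← Finset.sum_filter (fun d => d * d ≤ m) (fun d => ((d : Int) + if d * d < m then ((m / d : Nat) : Int) else 0)),
    Finset.sum_add_distrib]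
  have hco : ∑ d ∈ m.divisors.filter (fun d => d * d ≤ m), (if d * d < m then ((m / d : Nat) : Int) else 0)
      = ∑ d ∈ m.divisors.filter (fun d => d * d < m), ((m / d : Nat) : Int) := by
    rw [Finset.sum_filter_of_ne (fun x _ hx => by
      by_cases h : x * x < m
      · omega
      · simp [h] at hx)]
    rw [← Finset.sum_filter]
  rw [hco]
  have hbij : ∑ d ∈ m.divisors.filter (fun d => d * d < m), ((m / d : Nat) : Int)
      = ∑ e ∈ m.divisors.filter (fun e => ¬ e * e ≤ m), ((e : Nat) : Int) := by
    apply Finset.sum_nbij' (fun d => m / d) (fun e => m / e)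
    · intro a ha
      rw [Finset.mem_filter, Nat.mem_divisors] at ha ⊢
      obtain ⟨⟨hdvd, -⟩, hlt⟩ := ha
      have ha1 : 0 < a := Nat.pos_of_ne_zero (by rintro rfl; simp at hdvd; omega)
      have he : m / a * a = m := Nat.div_mul_cancel hdvd
      refine ⟨⟨Nat.div_dvd_of_dvd hdvd, hm0⟩, ?_⟩
      have hae : a < m / a := by
        apply Nat.lt_of_mul_lt_mul_right (a := a)
        omega
      nlinarith
    · intro e he
      rw [Finset.mem_filter, Nat.mem_divisors] at he ⊢
      obtain ⟨⟨hdvd, -⟩, hgt⟩ := he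
      have he1 : 0 < e := Nat.pos_of_ne_zero (by rintro rfl; simp at hdvd; omega)
      have hd : m / e * e = m := Nat.div_mul_cancel hdvd
      refine ⟨⟨Nat.div_dvd_of_dvd hdvd, hm0⟩, ?_⟩
      have hde : m / e < e := by
        rcases Nat.lt_or_ge (m / e) e with hx | hx
        · exact hx
        · exfalso; nlinarith
      nlinarith
    · intro a ha
      rw [Finset.mem_filter, Nat.mem_divisors] at ha
      exact Nat.div_div_self ha.1.1 hm0
    · intro e he
      rw [Finset.mem_filter, Nat.mem_divisors] at he
      exact Nat.div_div_self he.1.1 hm0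
    · intro a ha; rfl
  rw [hbij]
  exact Finset.sum_filter_add_sum_filter_not _ _ _

-- both Pythons compute the same per-argument value
lemma key (n : Int) : aFold n = properSumB n := by
  by_cases h : n < 1
  · have hnil : PySem.List.pyRange 1 n 1 = [] := PySem.List.pyRange_one_eq_nil (by omega)
    simp [aFold, properSumB, hnil, h]
  · have hm : n = ((n.toNat : Nat) : Int) := by omega
    have hm1 : 1 ≤ n.toNat := by omega
    rw [hm, aFold_eq _ hm1]
    rw [properSumB]
    rw [if_neg (by omega : ¬ ((n.toNat : Int) < 1))]
    rw [loop_inv n.toNat (n.toNat + 1 - 1) 1 0 le_rfl rfl]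
    simp only [Int.toNat_one, zero_add]
    rw [pairing _ hm1]
    ring

-- ===== VERDICT (by name: the statement is the Claim_ definition above) =====
theorem friendly_pair_spec : Claim_equal_friendly_pair := by
  intro n1 n2 _
  unfold Spec_friendly_pair friendly_pair friendly_pair_alt
  have h1 : (PySem.List.pyRange 1 n1 1).foldl (fun s i => if PySem.Int.mod n1 i == 0 then s + i else s) 0 = properSumB n1 := key n1
  have h2 : (PySem.List.pyRange 1 n2 1).foldl (fun s j => if PySem.Int.mod n2 j == 0 then s + j else s) 0 = properSumB n2 := key n2
  rw [h1, h2]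
  by_cases e1 : properSumB n1 = n1 <;> by_cases e2 : properSumB n2 = n2 <;> simp [e1, e2]
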